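-- pv_equiv track=rewrite | github.com/nami4mo/competitive-programming-problems | practice/others/tenka1_2012_7_mle.py | check
-- ===== SOURCE A (Python) =====
-- def check(ses):
--     ok=True
--     t=0
--     for s,e in ses:
--         if t>s:return False
--         t=e
--     for s,e in ses:
--         s+=1440
--         e+=1440
--         if t>s:return False
--         t=e
--     return True
-- ===== SOURCE B (Python) =====
-- def check(ses):
--     t = 0
--     for s, e in ses:
--         if t > s:
--             return False
--         t = e
--     return not ses or t <= ses[0][0] + 1440
-- ===== Notes on version B (the rewrite author's own statement) =====
-- stated objective: simpler
-- what changed: The second pass over the +1440-shifted list is replaced by a single O(1) wrap-around comparison (last end vs first start + 1440), since its remaining interior checks duplicate the first pass; B is one loop plus one comparison.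
import Mathlib
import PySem

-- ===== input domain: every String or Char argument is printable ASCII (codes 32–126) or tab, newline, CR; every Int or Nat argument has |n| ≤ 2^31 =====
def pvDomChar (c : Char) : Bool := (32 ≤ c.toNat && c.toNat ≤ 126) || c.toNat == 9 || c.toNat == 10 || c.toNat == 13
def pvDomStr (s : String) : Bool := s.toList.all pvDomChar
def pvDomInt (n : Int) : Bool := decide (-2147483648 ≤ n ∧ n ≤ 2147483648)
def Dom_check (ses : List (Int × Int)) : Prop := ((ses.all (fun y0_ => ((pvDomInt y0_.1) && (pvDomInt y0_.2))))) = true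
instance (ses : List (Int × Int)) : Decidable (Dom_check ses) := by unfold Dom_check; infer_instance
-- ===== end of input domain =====

-- B replaces A's second (+1440-shifted) pass by a single wrap-around comparison; objective: simpler.


-- ===== PORT A =====
-- first loop: returns none on the early `return False`, else the final t
def checkLoop1 (t : Int) : List (Int × Int) → Option Int
  | [] => some t
  | (s, e) :: rest => if t > s then none else checkLoop1 e rest

-- second loop over the +1440-shifted pairs
def checkLoop2 (t : Int) : List (Int × Int) → Bool
  | [] => true
  | (s, e) :: rest => if t > s + 1440 then false else checkLoop2 (e + 1440) rest

def check (ses : List (Int × Int)) : Bool :=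
  match checkLoop1 0 ses with
  | none => false
  | some t => checkLoop2 t ses

-- ===== PORT B =====
-- B's single pass: none on early `return False`, else the last end t
def checkAltLoop (t : Int) : List (Int × Int) → Option Int
  | [] => some t
  | (s, e) :: rest => if t > s then none else checkAltLoop e rest

def check_alt (ses : List (Int × Int)) : Bool :=
  match checkAltLoop 0 ses with
  | none => false
  | some t =>
    match ses with
    | [] => true
    | (s0, _) :: _ => decide (t ≤ s0 + 1440)

-- ===== PRECONDITION & SPEC =====
def Spec_check (ses : List (Int × Int)) (out : Bool) : Prop := out = check_alt ses
instance (ses : List (Int × Int)) (out : Bool) : Decidable (Spec_check ses out) := by unfold Spec_check; infer_instance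

-- ===== CLAIM (what is proved, stated in full; the proofs are below) =====
def Claim_equal_check : Prop := ∀ (ses : List (Int × Int)), Dom_check ses → Spec_check ses (check ses)

-- ===== LEMMAS AND PROOFS =====

theorem loop1_eq_altLoop (ses : List (Int × Int)) (t : Int) :
    checkLoop1 t ses = checkAltLoop t ses := by
  induction ses generalizing t with
  | nil => rfl
  | cons p rest ih =>
    obtain ⟨s, e⟩ := p
    simp only [checkLoop1, checkAltLoop]
    split_ifs <;> simp [ih]

-- if the first pass passes from t0, the shifted second pass starting at t0+1440 succeeds
theorem loop2_of_loop1 (ses : List (Int × Int)) (t0 tf : Int)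
    (h : checkLoop1 t0 ses = some tf) : checkLoop2 (t0 + 1440) ses = true := by
  induction ses generalizing t0 with
  | nil => rfl
  | cons p rest ih =>
    obtain ⟨s, e⟩ := p
    simp only [checkLoop1] at h
    by_cases hs : t0 > s
    · simp [hs] at h
    · simp only [hs] at h
      simp only [checkLoop2]
      have : ¬ (t0 + 1440 > s + 1440) := by omega
      simp only [this]
      exact ih e h

-- ===== VERDICT (by name: the statement is the Claim_ definition above) =====
theorem check_spec : Claim_equal_check := by
  intro ses _
  unfold Spec_check check check_alt
  rw [← loop1_eq_altLoop]
  cases hL : checkLoop1 0 ses with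
  | none => rfl
  | some tf =>
    cases ses with
    | nil => simp [checkLoop1] at hL; subst hL; rfl
    | cons p rest =>
      obtain ⟨s0, e0⟩ := p
      simp only [checkLoop1] at hL
      by_cases hs : (0 : Int) > s0
      · simp [hs] at hL
      · simp only [hs] at hL
        simp only [checkLoop2]
        by_cases hw : tf > s0 + 1440
        · have hnd : ¬ tf ≤ s0 + 1440 := by omega
          simp [hw, hnd]
        · have hd : tf ≤ s0 + 1440 := by omega
          rw [if_neg hw, loop2_of_loop1 rest e0 tf hL]
          simp [hd]
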